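-- pv_equiv track=rewrite | github.com/bmegyesi/swegram-v2 | swegram_main/handle_texts/general_func.py | merge_length_list
-- ===== SOURCE A (Python) =====
-- def merge_length_list(lists):
--     res_list = []
--     for l in lists:
--         if len(res_list) < len(l):
--             res_list[len(res_list):] = [0] * (len(l)-len(res_list))
--         for length, num in enumerate(l):
--             res_list[length] += num
--     return res_list
-- ===== SOURCE B (Python) =====
-- def merge_length_list(lists):
--     maxlen = max(map(len, lists), default=0)
--     return [sum(l[i] if i < len(l) else 0 for l in lists) for i in range(maxlen)]
-- ===== Notes on version B (the rewrite author's own statement) =====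
-- stated objective: idiomatic
-- what changed: Column-wise computation: take the maximum length once and sum each position across all lists, instead of A's row-wise accumulation with explicit zero-padding and in-place index updates.
import Mathlib
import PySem

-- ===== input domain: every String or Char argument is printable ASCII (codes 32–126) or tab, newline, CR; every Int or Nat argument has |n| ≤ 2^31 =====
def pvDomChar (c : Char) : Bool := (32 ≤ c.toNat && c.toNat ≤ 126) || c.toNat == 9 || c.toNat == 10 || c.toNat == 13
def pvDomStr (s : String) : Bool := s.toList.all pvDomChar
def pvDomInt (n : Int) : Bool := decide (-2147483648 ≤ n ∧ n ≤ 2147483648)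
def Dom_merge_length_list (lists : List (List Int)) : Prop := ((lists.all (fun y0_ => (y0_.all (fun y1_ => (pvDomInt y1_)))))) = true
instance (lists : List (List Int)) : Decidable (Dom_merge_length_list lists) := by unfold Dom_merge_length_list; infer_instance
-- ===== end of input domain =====

-- B computes the merge column-wise (max length, then per-position sums) instead of A's
-- row-wise accumulation with padding and in-place updates; objective: idiomatic.


-- ===== PORT A =====
-- inner loop `for length, num in enumerate(l): res_list[length] += num`,
-- rendered with an explicit running index
def pvAddLoop (r : List Int) (l : List Int) (i : Nat) : List Int :=
  match l with
  | [] => r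
  | num :: rest => pvAddLoop (r.set i (r.getD i 0 + num)) rest (i + 1)

def merge_length_list (lists : List (List Int)) : List Int :=
  lists.foldl
    (fun res_list l =>
      let res_list :=
        if res_list.length < l.length then
          res_list ++ List.replicate (l.length - res_list.length) (0 : Int)
        else res_list
      pvAddLoop res_list l 0)
    []

-- ===== PORT B =====
def merge_length_list_alt (lists : List (List Int)) : List Int :=
  let maxlen := (lists.map List.length).foldr max 0
  (List.range maxlen).map (fun i =>
    (lists.map (fun l => if i < l.length then l.getD i 0 else 0)).sum)

-- ===== PRECONDITION & SPEC =====
def Spec_merge_length_list (lists : List (List Int)) (out : List Int) : Prop := out = merge_length_list_alt lists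
instance (lists : List (List Int)) (out : List Int) : Decidable (Spec_merge_length_list lists out) := by unfold Spec_merge_length_list; infer_instance

-- ===== CLAIM (what is proved, stated in full; the proofs are below) =====
def Claim_equal_merge_length_list : Prop := ∀ (lists : List (List Int)), Dom_merge_length_list lists → Spec_merge_length_list lists (merge_length_list lists)

-- ===== LEMMAS AND PROOFS =====

/-- Pointwise addition keeping the tail of the longer list. -/
def zipAdd : List Int → List Int → List Int
  | r, [] => r
  | [], l => l
  | a :: as_, b :: bs => (a + b) :: zipAdd as_ bs

lemma zipAdd_nil_right (r : List Int) : zipAdd r [] = r := by cases r <;> rfl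

lemma zipAdd_length (a b : List Int) : (zipAdd a b).length = max a.length b.length := by
  induction a generalizing b with
  | nil => cases b <;> simp [zipAdd]
  | cons x xs ih =>
    cases b with
    | nil => simp [zipAdd]
    | cons y ys => simp [zipAdd, ih]

lemma zipAdd_getD (a b : List Int) (i : Nat) :
    (zipAdd a b).getD i 0 = a.getD i 0 + b.getD i 0 := by
  induction a generalizing b i with
  | nil => cases b <;> simp [zipAdd]
  | cons x xs ih =>
    cases b with
    | nil => simp [zipAdd]
    | cons y ys =>
      cases i with
      | zero => simp [zipAdd]
      | succ n => simpa [List.getD] using ih ys n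

lemma pvAddLoop_shift (l : List Int) (c : Int) (r : List Int) (i : Nat) :
    pvAddLoop (c :: r) l (i + 1) = c :: pvAddLoop r l i := by
  induction l generalizing c r i with
  | nil => rfl
  | cons x xs ih =>
    simp only [pvAddLoop, List.set, List.getD, List.getElem?_cons_succ]
    exact ih _ _ _

lemma pvAddLoop_eq_zipAdd (l r : List Int) (h : l.length ≤ r.length) :
    pvAddLoop r l 0 = zipAdd r l := by
  induction l generalizing r with
  | nil => simp [pvAddLoop, zipAdd_nil_right]
  | cons x xs ih =>
    cases r with
    | nil => simp at h
    | cons a ps =>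
      simp only [pvAddLoop, List.set, List.getD, List.getElem?_cons_zero, Option.getD_some]
      rw [pvAddLoop_shift, ih ps (by simpa using h)]
      rfl

lemma zipAdd_replicate_zero (l : List Int) :
    zipAdd (List.replicate l.length 0) l = l := by
  induction l with
  | nil => rfl
  | cons y ys ih => simp [List.replicate, zipAdd, ih]

lemma zipAdd_pad (r l : List Int) (h : r.length < l.length) :
    zipAdd (r ++ List.replicate (l.length - r.length) 0) l = zipAdd r l := by
  induction r generalizing l with
  | nil =>
    simp only [List.nil_append, List.length_nil, Nat.sub_zero]
    rw [zipAdd_replicate_zero]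
    cases l <;> rfl
  | cons a as_ ih =>
    cases l with
    | nil => simp at h
    | cons y ys =>
      simp only [List.cons_append, zipAdd, List.length_cons]
      congr 1
      have h' : as_.length < ys.length := by simpa using h
      simpa [Nat.succ_sub_succ] using ih ys h'

/-- A's per-list step equals `zipAdd`. -/
lemma stepA_eq (res l : List Int) :
    pvAddLoop (if res.length < l.length then
        res ++ List.replicate (l.length - res.length) (0 : Int) else res) l 0
      = zipAdd res l := by
  split_ifs with h
  · rw [pvAddLoop_eq_zipAdd _ _ (by simp; omega), zipAdd_pad _ _ h]
  · exact pvAddLoop_eq_zipAdd _ _ (by omega)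

lemma foldl_zipAdd_length (lists : List (List Int)) (acc : List Int) :
    (lists.foldl zipAdd acc).length = max acc.length ((lists.map List.length).foldr max 0) := by
  induction lists generalizing acc with
  | nil => simp
  | cons l ls ih =>
    simp only [List.foldl_cons, List.map_cons, List.foldr_cons, ih, zipAdd_length]
    omega

lemma foldl_zipAdd_getD (lists : List (List Int)) (acc : List Int) (i : Nat) :
    (lists.foldl zipAdd acc).getD i 0
      = acc.getD i 0 + (lists.map (fun l => l.getD i 0)).sum := by
  induction lists generalizing acc with
  | nil => simp
  | cons l ls ih =>
    simp only [List.foldl_cons, List.map_cons, List.sum_cons, ih, zipAdd_getD]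
    ring

lemma mergeA_eq_foldl_zipAdd (lists : List (List Int)) :
    merge_length_list lists = lists.foldl zipAdd [] := by
  unfold merge_length_list
  suffices h : ∀ acc : List Int,
      lists.foldl (fun res_list l =>
        let res_list := if res_list.length < l.length then
          res_list ++ List.replicate (l.length - res_list.length) (0 : Int) else res_list
        pvAddLoop res_list l 0) acc = lists.foldl zipAdd acc from h []
  induction lists with
  | nil => intro acc; rfl
  | cons l ls ih =>
    intro acc
    simp only [List.foldl_cons]
    rw [show (let res_list := if acc.length < l.length then
          acc ++ List.replicate (l.length - acc.length) (0 : Int) else acc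
        pvAddLoop res_list l 0) = zipAdd acc l from stepA_eq acc l]
    exact ih (zipAdd acc l)

lemma getD_eq_if (l : List Int) (i : Nat) :
    (if i < l.length then l.getD i 0 else 0) = l.getD i 0 := by
  split_ifs with h
  · rfl
  · rw [List.getD_eq_default]; omega

-- ===== VERDICT (by name: the statement is the Claim_ definition above) =====
theorem merge_length_list_spec : Claim_equal_merge_length_list := by
  intro lists _
  unfold Spec_merge_length_list merge_length_list_alt
  rw [mergeA_eq_foldl_zipAdd]
  apply List.ext_getElem
  · simp [foldl_zipAdd_length]
  · intro i hi hi'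
    have h1 : (lists.foldl zipAdd []).getD i 0
        = (lists.map (fun l => l.getD i 0)).sum := by
      simpa using foldl_zipAdd_getD lists [] i
    have h2 : (lists.foldl zipAdd [])[i] = (lists.foldl zipAdd []).getD i 0 := by
      rw [List.getD_eq_getElem?_getD, List.getElem?_eq_getElem hi]; rfl
    simp only [List.getElem_map, List.getElem_range]
    rw [h2, h1]
    congr 1
    exact List.map_congr_left fun l _ => (getD_eq_if l i).symm
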